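-- pv_equiv track=rewrite | github.com/da0it/ts_calls_automation_rbpo | services/router/routing/nlp_preprocess.py | dedupe_nearby
-- ===== SOURCE A (Python) =====
-- from typing import List, Optional, Tuple, Dict, Any
--
-- def dedupe_nearby(texts: List[str], window: int = 2) -> List[str]:
--     out: List[str] = []
--     recent: List[str] = []
--     for t in texts:
--         if t in recent:
--             continue
--         out.append(t)
--         recent.append(t)
--         if len(recent) > window:
--             recent.pop(0)
--     return out
-- ===== SOURCE B (Python) =====
-- def dedupe_nearby(texts, window=2):
--     # Recency-arithmetic dedup: no window container at all.  A map records, for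
--     # each text, the output index at which it was last kept; a text is a nearby
--     # duplicate iff that index is within `window` of the current output length.
--     out = []
--     last = {}  # text -> index in out of its most recent kept occurrence
--     k = 0      # == len(out)
--     for t in texts:
--         j = last.get(t)
--         if j is not None and k - j <= window:
--             continue
--         out.append(t)
--         last[t] = k
--         k += 1
--     return out
-- ===== Notes on version B (the rewrite author's own statement) =====
-- stated objective: faster
-- what changed: Replaces the maintained sliding-window list (membership scan + pop(0) eviction) with a last-kept-position map and an arithmetic recency test k - last[t] <= window, so no window structure is stored or evicted at all.
import Mathlib
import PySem

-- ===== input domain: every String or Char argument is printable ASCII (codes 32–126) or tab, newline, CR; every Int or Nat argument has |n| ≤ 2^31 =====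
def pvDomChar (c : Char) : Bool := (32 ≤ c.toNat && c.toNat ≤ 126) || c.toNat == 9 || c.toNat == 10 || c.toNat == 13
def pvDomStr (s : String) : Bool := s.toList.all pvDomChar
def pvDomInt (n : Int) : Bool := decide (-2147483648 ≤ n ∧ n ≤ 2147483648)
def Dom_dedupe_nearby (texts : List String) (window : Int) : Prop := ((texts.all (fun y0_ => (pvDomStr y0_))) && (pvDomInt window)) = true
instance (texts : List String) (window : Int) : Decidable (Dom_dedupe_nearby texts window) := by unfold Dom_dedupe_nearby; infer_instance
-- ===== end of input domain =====

-- B drops A's sliding-window list (membership scan + pop(0) eviction) and instead keeps a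
-- last-kept-position map with an arithmetic recency test k - last[t] <= window; objective: faster.

-- ===== PORT A =====
-- one loop iteration of A: membership scan of `recent`, append, pop(0) when over the window
-- (recent.pop(0) = recent.drop 1: the list is nonempty at that point, so pop(0) cannot raise)
def stepA (window : Int) (st : List String × List String) (t : String) : List String × List String :=
  if st.2.contains t then st
  else
    let out := st.1 ++ [t]
    let recent := st.2 ++ [t]
    if (recent.length : Int) > window then (out, recent.drop 1) else (out, recent)

def dedupe_nearby (texts : List String) (window : Int) : List String :=
  (texts.foldl (stepA window) ([], [])).1

-- ===== PORT B =====
-- one loop iteration of B: `last.get(t)` lookup, recency test k - j <= window, else append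
-- and record last[t] = k, k += 1  (state = (out, last, k))
def stepB (window : Int) (st : List String × PySem.Dict String Int × Int) (t : String) :
    List String × PySem.Dict String Int × Int :=
  match PySem.Dict.get? st.2.1 t with
  | some j =>
      if st.2.2 - j ≤ window then st
      else (st.1 ++ [t], PySem.Dict.insert st.2.1 t st.2.2, st.2.2 + 1)
  | none => (st.1 ++ [t], PySem.Dict.insert st.2.1 t st.2.2, st.2.2 + 1)

def dedupe_nearby_alt (texts : List String) (window : Int) : List String :=
  (texts.foldl (stepB window) ([], PySem.Dict.empty, 0)).1

-- ===== PRECONDITION & SPEC =====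
def Spec_dedupe_nearby (texts : List String) (window : Int) (out : List String) : Prop := out = dedupe_nearby_alt texts window
instance (texts : List String) (window : Int) (out : List String) : Decidable (Spec_dedupe_nearby texts window out) := by unfold Spec_dedupe_nearby; infer_instance

-- ===== CLAIM (what is proved, stated in full; the proofs are below) =====
def Claim_equal_dedupe_nearby : Prop := ∀ (texts : List String) (window : Int), Dom_dedupe_nearby texts window → Spec_dedupe_nearby texts window (dedupe_nearby texts window)

-- ===== LEMMAS AND PROOFS =====

-- index of the LAST occurrence of t in l (none if absent)
def lastIdx? (l : List String) (t : String) : Option Nat :=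
  match l with
  | [] => none
  | x :: xs =>
    match lastIdx? xs t with
    | some j => some (j + 1)
    | none => if x = t then some 0 else none

lemma lastIdx?_none_iff (l : List String) (t : String) :
    lastIdx? l t = none ↔ t ∉ l := by
  induction l with
  | nil => simp [lastIdx?]
  | cons x xs ih =>
    simp only [lastIdx?, List.mem_cons]
    cases h : lastIdx? xs t with
    | some j =>
      have hmem : t ∈ xs := by
        by_contra hm
        rw [← ih] at hm
        simp [h] at hm
      simp [hmem]
    | none =>
      have hxs : t ∉ xs := ih.mp h
      by_cases hx : x = t
      · subst hx
        simp
      · simp [hx, Ne.symm hx, hxs]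

lemma lastIdx?_isSome (l : List String) (t : String) (h : t ∈ l) :
    ∃ j, lastIdx? l t = some j := by
  cases h2 : lastIdx? l t with
  | some j => exact ⟨j, rfl⟩
  | none => exact absurd h ((lastIdx?_none_iff l t).mp h2)

lemma lastIdx?_lt (l : List String) (t : String) (j : Nat) (h : lastIdx? l t = some j) :
    j < l.length := by
  induction l generalizing j with
  | nil => simp [lastIdx?] at h
  | cons x xs ih =>
    simp only [lastIdx?] at h
    cases h2 : lastIdx? xs t with
    | some j' =>
      rw [h2] at h
      cases h
      simpa using Nat.succ_lt_succ (ih j' h2)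
    | none =>
      rw [h2] at h
      split_ifs at h with hx
      · cases h; simp

-- membership in a drop-suffix ⇔ the last occurrence lies at index ≥ e
lemma mem_drop_iff_lastIdx (l : List String) (t : String) (e : Nat) :
    t ∈ l.drop e ↔ ∃ j, lastIdx? l t = some j ∧ e ≤ j := by
  induction l generalizing e with
  | nil => simp [lastIdx?]
  | cons x xs ih =>
    cases e with
    | zero =>
      simp only [List.drop_zero]
      constructor
      · intro hm
        obtain ⟨j, hj⟩ := lastIdx?_isSome (x :: xs) t hm
        exact ⟨j, hj, Nat.zero_le _⟩
      · rintro ⟨j, hj, -⟩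
        by_contra hm
        rw [← lastIdx?_none_iff] at hm
        rw [hm] at hj
        cases hj
    | succ e' =>
      simp only [List.drop_succ_cons]
      rw [ih]
      constructor
      · rintro ⟨j, hj, hle⟩
        exact ⟨j + 1, by simp [lastIdx?, hj], Nat.succ_le_succ hle⟩
      · rintro ⟨j, hj, hle⟩
        simp only [lastIdx?] at hj
        cases h2 : lastIdx? xs t with
        | some j' =>
          rw [h2] at hj
          cases hj
          exact ⟨j', rfl, Nat.le_of_succ_le_succ hle⟩
        | none =>
          rw [h2] at hj
          split_ifs at hj with hx
          · cases hj
            exact absurd hle (by omega)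

-- appending a new element: its last index is the old length; other keys unchanged
lemma lastIdx?_append_self (l : List String) (t : String) :
    lastIdx? (l ++ [t]) t = some l.length := by
  induction l with
  | nil => simp [lastIdx?]
  | cons x xs ih => simp [lastIdx?, ih]

lemma lastIdx?_append_ne (l : List String) (t s : String) (h : s ≠ t) :
    lastIdx? (l ++ [s]) t = lastIdx? l t := by
  induction l with
  | nil => simp [lastIdx?, h]
  | cons x xs ih => simp [lastIdx?, ih]

-- the eviction index of A's window as a function of the output length
def eFun (k : Nat) (w : Int) : Nat := min k (k - w).toNat

lemma eFun_le (k : Nat) (w : Int) : eFun k w ≤ k := Nat.min_le_left _ _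

lemma eFun_succ_pos (k : Nat) (w : Int) (h : (k : Int) - (eFun k w : Nat) + 1 > w) :
    eFun (k + 1) w = eFun k w + 1 := by
  simp only [eFun] at h ⊢
  omega

lemma eFun_succ_neg (k : Nat) (w : Int) (h : ¬((k : Int) - (eFun k w : Nat) + 1 > w)) :
    eFun (k + 1) w = eFun k w := by
  simp only [eFun] at h ⊢
  omega

-- the loop invariant: A's recent window is out.drop (eFun |out| w); B's dict records last
-- kept indices; then the two folds produce the same output component.
lemma loop_inv (ts : List String) (w : Int) :
    ∀ (out : List String) (d : PySem.Dict String Int),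
      (∀ t, PySem.Dict.get? d t = (lastIdx? out t).map (fun j => (j : Int))) →
      (ts.foldl (stepA w) (out, out.drop (eFun out.length w))).1 =
        (ts.foldl (stepB w) (out, d, (out.length : Int))).1 := by
  induction ts with
  | nil => intro out d _; rfl
  | cons t ts ih =>
    intro out d hd
    simp only [List.foldl_cons]
    set k := out.length with hk
    -- the two skip conditions coincide
    have hmem : ((out.drop (eFun k w)).contains t = true) ↔
        (∃ j : Nat, lastIdx? out t = some j ∧ (k : Int) - (j : Int) ≤ w) := by
      rw [List.contains_iff_mem, mem_drop_iff_lastIdx]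
      constructor
      · rintro ⟨j, hj, hle⟩
        refine ⟨j, hj, ?_⟩
        have hjk := lastIdx?_lt out t j hj
        have : eFun k w ≤ j := hle
        simp only [eFun] at this
        omega
      · rintro ⟨j, hj, hle⟩
        refine ⟨j, hj, ?_⟩
        have hjk := lastIdx?_lt out t j hj
        simp only [eFun]
        omega
    by_cases hskip : ∃ j : Nat, lastIdx? out t = some j ∧ (k : Int) - (j : Int) ≤ w
    · -- both skip
      obtain ⟨j, hj, hle⟩ := hskip
      have hc : (out.drop (eFun k w)).contains t = true := hmem.mpr ⟨j, hj, hle⟩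
      have hA : stepA w (out, out.drop (eFun k w)) t = (out, out.drop (eFun k w)) := by
        simp only [stepA]
        rw [if_pos hc]
      have hB : stepB w (out, d, (k : Int)) t = (out, d, (k : Int)) := by
        simp [stepB, hd t, hj, hle]
      rw [hA, hB]
      exact ih out d hd
    · -- both keep
      have hnc : (out.drop (eFun k w)).contains t = false := by
        rw [Bool.eq_false_iff]
        intro hc
        exact hskip (hmem.mp hc)
      have hA : stepA w (out, out.drop (eFun k w)) t =
          (out ++ [t], (out ++ [t]).drop (eFun (out ++ [t]).length w)) := by
        simp only [stepA, hnc, Bool.false_eq_true, if_false]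
        have hdropapp : (out.drop (eFun k w)) ++ [t] = (out ++ [t]).drop (eFun k w) :=
          (List.drop_append_of_le_length (eFun_le k w)).symm
        have hlen : ((out.drop (eFun k w) ++ [t]).length : Int) = (k : Int) - eFun k w + 1 := by
          have := eFun_le k w
          simp only [List.length_append, List.length_drop, List.length_cons, List.length_nil]
          push_cast
          omega
        have hlen2 : (out ++ [t]).length = k + 1 := by simp [hk]
        by_cases hgt : ((out.drop (eFun k w) ++ [t]).length : Int) > w
        · rw [if_pos hgt]
          have he : eFun (k + 1) w = eFun k w + 1 := eFun_succ_pos k w (by rwa [hlen] at hgt)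
          rw [hlen2, he, hdropapp, List.drop_drop]
        · rw [if_neg hgt]
          have he : eFun (k + 1) w = eFun k w := eFun_succ_neg k w (by rwa [hlen] at hgt)
          rw [hlen2, he, hdropapp]
      have hB : stepB w (out, d, (k : Int)) t =
          (out ++ [t], PySem.Dict.insert d t (k : Int), (k : Int) + 1) := by
        cases hli : lastIdx? out t with
        | none => simp [stepB, hd t, hli]
        | some j =>
          have hle : ¬ ((k : Int) - (j : Int) ≤ w) := fun h => hskip ⟨j, hli, h⟩
          simp [stepB, hd t, hli, hle]
      rw [hA, hB]
      have hd' : ∀ s, PySem.Dict.get? (PySem.Dict.insert d t (k : Int)) s =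
          (lastIdx? (out ++ [t]) s).map (fun j => (j : Int)) := by
        intro s
        rw [PySem.Dict.get?_insert]
        by_cases hs : s = t
        · subst hs
          simp [lastIdx?_append_self, hk]
        · rw [if_neg hs, lastIdx?_append_ne out s t (Ne.symm hs), hd s]
      have hlen2 : ((out ++ [t]).length : Int) = (k : Int) + 1 := by simp [hk]
      have := ih (out ++ [t]) (PySem.Dict.insert d t (k : Int)) hd'
      rw [hlen2] at this
      exact this

-- ===== VERDICT (by name: the statement is the Claim_ definition above) =====
theorem dedupe_nearby_spec : Claim_equal_dedupe_nearby := by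
  intro texts window _
  unfold Spec_dedupe_nearby dedupe_nearby dedupe_nearby_alt
  have h := loop_inv texts window [] PySem.Dict.empty
    (by intro t; simp [lastIdx?, PySem.Dict.get?_empty])
  simpa [eFun] using h
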